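-- pv_equiv track=rewrite | github.com/subin131/Python-Projects | IndividualProject/Temperature.py | categoryCheck
-- ===== SOURCE A (Python) =====
-- def categoryCheck(temperature):
--     results={}
--     countHot=0
--     countNormal=0
--     countCold=0
--     for day,temp in temperature.items():
--         if temp>85:
--             result="very hot"
--             countHot=countHot+1
--         elif temp>60 and temp<=85:
--             result="pleasant day"
--             countNormal=countNormal+1
--         else:
--             result= "very cold"
--             countCold=countCold+1
--         results[day]=result
--     return results,countHot,countNormal,countCold
-- ===== SOURCE B (Python) =====
-- def _classify(temp):
--     if temp > 85:
--         return "very hot"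
--     if 60 < temp <= 85:
--         return "pleasant day"
--     return "very cold"
--
-- def categoryCheck(temperature):
--     results = {day: _classify(temp) for day, temp in temperature.items()}
--     labels = [_classify(temp) for temp in temperature.values()]
--     return results, labels.count("very hot"), labels.count("pleasant day"), labels.count("very cold")
-- ===== Notes on version B (the rewrite author's own statement) =====
-- stated objective: simpler
-- what changed: A single loop maintaining four pieces of state (dict plus three inline counters) is split into a dict comprehension that classifies, a label list, and three list.count calls; no mutable counters.
import Mathlib
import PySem

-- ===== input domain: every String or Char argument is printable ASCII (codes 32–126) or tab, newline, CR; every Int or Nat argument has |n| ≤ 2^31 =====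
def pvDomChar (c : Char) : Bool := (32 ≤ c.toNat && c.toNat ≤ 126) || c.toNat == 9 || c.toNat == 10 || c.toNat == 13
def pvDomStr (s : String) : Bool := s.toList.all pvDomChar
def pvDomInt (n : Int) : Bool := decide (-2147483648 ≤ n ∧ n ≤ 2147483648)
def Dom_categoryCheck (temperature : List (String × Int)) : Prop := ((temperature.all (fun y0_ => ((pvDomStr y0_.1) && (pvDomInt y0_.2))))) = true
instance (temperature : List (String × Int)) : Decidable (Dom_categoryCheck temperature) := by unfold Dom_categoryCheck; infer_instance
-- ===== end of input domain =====

-- B separates classification from counting: a dict-comprehension pass builds the labels, then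
-- three list.count calls replace A's inline mutable counters (objective: simpler).


-- ===== PORT A =====
-- literal port: one loop over the items, a results dict and three counters updated in place
def categoryCheck (temperature : List (String × Int)) : (List (String × String)) × Int × Int × Int :=
  let st := temperature.foldl
    (fun (st : PySem.Dict String String × Int × Int × Int) dt =>
      if dt.2 > 85 then
        (st.1.insert dt.1 "very hot", st.2.1 + 1, st.2.2.1, st.2.2.2)
      else if dt.2 > 60 ∧ dt.2 ≤ 85 then
        (st.1.insert dt.1 "pleasant day", st.2.1, st.2.2.1 + 1, st.2.2.2)
      else
        (st.1.insert dt.1 "very cold", st.2.1, st.2.2.1, st.2.2.2 + 1))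
    (PySem.Dict.empty, 0, 0, 0)
  (st.1.items, st.2.1, st.2.2.1, st.2.2.2)

-- ===== PORT B =====
def pvClassify (temp : Int) : String :=
  if temp > 85 then "very hot"
  else if 60 < temp ∧ temp ≤ 85 then "pleasant day"
  else "very cold"

def categoryCheck_alt (temperature : List (String × Int)) : (List (String × String)) × Int × Int × Int :=
  let results := temperature.foldl (fun d p => d.insert p.1 (pvClassify p.2)) PySem.Dict.empty
  let labels := temperature.map (fun p => pvClassify p.2)
  (results.items, (labels.count "very hot" : Int), (labels.count "pleasant day" : Int),
    (labels.count "very cold" : Int))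

-- ===== PRECONDITION & SPEC =====
def Spec_categoryCheck (temperature : List (String × Int)) (out : (List (String × String)) × Int × Int × Int) : Prop := out = categoryCheck_alt temperature
instance (temperature : List (String × Int)) (out : (List (String × String)) × Int × Int × Int) : Decidable (Spec_categoryCheck temperature out) := by unfold Spec_categoryCheck; infer_instance

-- ===== CLAIM (what is proved, stated in full; the proofs are below) =====
def Claim_equal_categoryCheck : Prop := ∀ (temperature : List (String × Int)), Dom_categoryCheck temperature → Spec_categoryCheck temperature (categoryCheck temperature)

-- ===== LEMMAS AND PROOFS =====

theorem categoryCheck_fold (l : List (String × Int)) (d : PySem.Dict String String)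
    (h n c : Int) :
    l.foldl
      (fun (st : PySem.Dict String String × Int × Int × Int) dt =>
        if dt.2 > 85 then
          (st.1.insert dt.1 "very hot", st.2.1 + 1, st.2.2.1, st.2.2.2)
        else if dt.2 > 60 ∧ dt.2 ≤ 85 then
          (st.1.insert dt.1 "pleasant day", st.2.1, st.2.2.1 + 1, st.2.2.2)
        else
          (st.1.insert dt.1 "very cold", st.2.1, st.2.2.1, st.2.2.2 + 1))
      (d, h, n, c)
    = (l.foldl (fun d p => d.insert p.1 (pvClassify p.2)) d,
       h + ((l.map (fun p => pvClassify p.2)).count "very hot" : Int),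
       n + ((l.map (fun p => pvClassify p.2)).count "pleasant day" : Int),
       c + ((l.map (fun p => pvClassify p.2)).count "very cold" : Int)) := by
  induction l generalizing d h n c with
  | nil => simp
  | cons p tl ih =>
    simp only [List.foldl_cons, List.map_cons]
    by_cases h1 : p.2 > 85
    · rw [if_pos h1, ih]
      have : pvClassify p.2 = "very hot" := by simp [pvClassify, h1]
      rw [this]
      simp
      omega
    · rw [if_neg h1]
      by_cases h2 : p.2 > 60 ∧ p.2 ≤ 85
      · rw [if_pos h2, ih]
        have : pvClassify p.2 = "pleasant day" := by
          simp only [pvClassify]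
          rw [if_neg h1, if_pos ⟨h2.1, h2.2⟩]
        rw [this]
        simp
        omega
      · rw [if_neg h2, ih]
        have : pvClassify p.2 = "very cold" := by
          simp only [pvClassify]
          rw [if_neg h1, if_neg (by exact fun hc => h2 ⟨hc.1, hc.2⟩)]
        rw [this]
        simp
        omega

-- ===== VERDICT (by name: the statement is the Claim_ definition above) =====
theorem categoryCheck_spec : Claim_equal_categoryCheck := by
  intro temperature _
  unfold Spec_categoryCheck categoryCheck categoryCheck_alt
  rw [categoryCheck_fold]
  simp
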